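-- pv_equiv track=rewrite | github.com/emilefraser/PyroDocker | dockerfiles/SnitchDNS/app/lib/dns/record_manager.py | get_record_type_properties
-- ===== SOURCE A (Python) =====
-- def get_record_type_properties(record_type, clean=False):
--     properties = {}
--     if record_type in ['NS', 'CNAME', 'PTR', 'DNAME']:
--         properties = {
--             'name': 'str'
--         }
--     elif record_type in ['A', 'AAAA']:
--         properties = {
--             'address': 'str'
--         }
--     elif record_type in ['SOA']:
--         properties = {
--             'mname': 'str',
--             'rname': 'str',
--             'serial': 'int',
--             'refresh': 'int',
--             'retry': 'int',
--             'expire': 'int',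
--             'minimum': 'int'
--         }
--     elif record_type in ['SRV']:
--         properties = {
--             'target': 'str',
--             'port': 'int',
--             'priority': 'int',
--             'weight': 'int'
--         }
--     elif record_type in ['NAPTR']:
--         properties = {
--             'order': 'int',
--             'preference': 'int',
--             'flags': 'str',
--             'service': 'str',
--             'regexp': 'str',
--             'replacement': 'str'
--         }
--     elif record_type in ['AFSDB']:
--         properties = {
--             'hostname': 'str',
--             'subtype': 'int'
--         }
--     elif record_type in ['RP']:
--         properties = {
--             'mbox': 'str',
--             'txt': 'str'
--         }
--     elif record_type in ['HINFO']:
--         properties = {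
--             'cpu': 'str',
--             'os': 'str'
--         }
--     elif record_type in ['MX']:
--         properties = {
--             'name2': 'str',
--             'preference2': 'int'
--         }
--     elif record_type in ['SSHFP']:
--         properties = {
--             'algorithm': 'int',
--             'fingerprint_type': 'int',
--             'fingerprint': 'str'
--         }
--     elif record_type in ['TXT', 'SPF']:
--         properties = {
--             'data': 'str'
--         }
--     elif record_type in ['TSIG']:
--         properties = {
--             'algorithm2': 'str',
--             'timesigned': 'int',
--             'fudge': 'int',
--             'original_id': 'int',
--             'mac': 'str',
--             'other_data': 'str'
--         }
--     elif record_type in ['CAA']: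
--         properties = {
--             'issue': 'str'
--         }
--
--     if clean:
--         to_clean = ['name2', 'preference2', 'algorithm2']
--         for name in to_clean:
--             if name in properties:
--                 properties[name.rstrip('2')] = properties.pop(name)
--
--     return properties
-- ===== SOURCE B (Python) =====
-- # B: table-driven — two precomputed schema tables (raw and cleaned), one lookup, no branching chain.
-- _RAW = {
--     'NS': {'name': 'str'}, 'CNAME': {'name': 'str'}, 'PTR': {'name': 'str'}, 'DNAME': {'name': 'str'},
--     'A': {'address': 'str'}, 'AAAA': {'address': 'str'},
--     'SOA': {'mname': 'str', 'rname': 'str', 'serial': 'int', 'refresh': 'int',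
--             'retry': 'int', 'expire': 'int', 'minimum': 'int'},
--     'SRV': {'target': 'str', 'port': 'int', 'priority': 'int', 'weight': 'int'},
--     'NAPTR': {'order': 'int', 'preference': 'int', 'flags': 'str', 'service': 'str',
--               'regexp': 'str', 'replacement': 'str'},
--     'AFSDB': {'hostname': 'str', 'subtype': 'int'},
--     'RP': {'mbox': 'str', 'txt': 'str'},
--     'HINFO': {'cpu': 'str', 'os': 'str'},
--     'MX': {'name2': 'str', 'preference2': 'int'},
--     'SSHFP': {'algorithm': 'int', 'fingerprint_type': 'int', 'fingerprint': 'str'},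
--     'TXT': {'data': 'str'}, 'SPF': {'data': 'str'},
--     'TSIG': {'algorithm2': 'str', 'timesigned': 'int', 'fudge': 'int',
--              'original_id': 'int', 'mac': 'str', 'other_data': 'str'},
--     'CAA': {'issue': 'str'},
-- }
--
-- _CLEAN = {
--     'MX': {'name': 'str', 'preference': 'int'},
--     'TSIG': {'timesigned': 'int', 'fudge': 'int', 'original_id': 'int',
--              'mac': 'str', 'other_data': 'str', 'algorithm': 'str'},
-- }
--
-- def get_record_type_properties(record_type, clean=False):
--     table = _RAW
--     if clean and record_type in _CLEAN:
--         table = _CLEAN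
--     return dict(table.get(record_type, {}))
-- ===== Notes on version B (the rewrite author's own statement) =====
-- stated objective: simpler
-- what changed: Replaces the 14-way if/elif chain plus the runtime rstrip/pop clean loop by two precomputed schema tables (raw and cleaned) and a single dictionary lookup that copies the looked-up schema.
import Mathlib
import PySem

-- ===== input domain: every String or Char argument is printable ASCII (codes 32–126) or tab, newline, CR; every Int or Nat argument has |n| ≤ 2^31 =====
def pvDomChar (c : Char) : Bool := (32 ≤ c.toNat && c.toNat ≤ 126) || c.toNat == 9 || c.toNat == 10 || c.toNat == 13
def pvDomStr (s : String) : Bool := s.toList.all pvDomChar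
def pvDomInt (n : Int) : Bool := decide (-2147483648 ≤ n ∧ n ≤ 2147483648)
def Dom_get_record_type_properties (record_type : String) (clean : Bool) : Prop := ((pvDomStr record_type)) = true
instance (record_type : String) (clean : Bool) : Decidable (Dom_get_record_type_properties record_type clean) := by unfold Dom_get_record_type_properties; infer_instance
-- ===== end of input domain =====

-- B replaces A's 14-way if/elif chain by two precomputed schema tables (raw and cleaned) and a single lookup; objective: simpler.

-- ===== PORT A =====
-- exact port of Python's name.rstrip('2'): drop trailing '2' characters
def pvRstrip2 (s : String) : String :=
  String.ofList ((s.toList.reverse.dropWhile (fun c => c == '2')).reverse)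

def get_record_type_properties (record_type : String) (clean : Bool) : List (String × String) :=
  let properties : PySem.Dict String String :=
    if record_type ∈ ["NS", "CNAME", "PTR", "DNAME"] then
      PySem.Dict.ofList [("name", "str")]
    else if record_type ∈ ["A", "AAAA"] then
      PySem.Dict.ofList [("address", "str")]
    else if record_type ∈ ["SOA"] then
      PySem.Dict.ofList [("mname", "str"), ("rname", "str"), ("serial", "int"), ("refresh", "int"),
                         ("retry", "int"), ("expire", "int"), ("minimum", "int")]
    else if record_type ∈ ["SRV"] then
      PySem.Dict.ofList [("target", "str"), ("port", "int"), ("priority", "int"), ("weight", "int")]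
    else if record_type ∈ ["NAPTR"] then
      PySem.Dict.ofList [("order", "int"), ("preference", "int"), ("flags", "str"),
                         ("service", "str"), ("regexp", "str"), ("replacement", "str")]
    else if record_type ∈ ["AFSDB"] then
      PySem.Dict.ofList [("hostname", "str"), ("subtype", "int")]
    else if record_type ∈ ["RP"] then
      PySem.Dict.ofList [("mbox", "str"), ("txt", "str")]
    else if record_type ∈ ["HINFO"] then
      PySem.Dict.ofList [("cpu", "str"), ("os", "str")]
    else if record_type ∈ ["MX"] then
      PySem.Dict.ofList [("name2", "str"), ("preference2", "int")]
    else if record_type ∈ ["SSHFP"] then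
      PySem.Dict.ofList [("algorithm", "int"), ("fingerprint_type", "int"), ("fingerprint", "str")]
    else if record_type ∈ ["TXT", "SPF"] then
      PySem.Dict.ofList [("data", "str")]
    else if record_type ∈ ["TSIG"] then
      PySem.Dict.ofList [("algorithm2", "str"), ("timesigned", "int"), ("fudge", "int"),
                         ("original_id", "int"), ("mac", "str"), ("other_data", "str")]
    else if record_type ∈ ["CAA"] then
      PySem.Dict.ofList [("issue", "str")]
    else
      PySem.Dict.empty
  let properties :=
    if clean then
      (["name2", "preference2", "algorithm2"]).foldl (fun d name =>
        if d.contains name then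
          match d.pop? name with
          | some (v, d') => d'.insert (pvRstrip2 name) v
          | none => d
        else d) properties
    else properties
  properties.items

-- ===== PORT B =====
def pvRawTable : PySem.Dict String (PySem.Dict String String) :=
  PySem.Dict.ofList
    [ ("NS", PySem.Dict.ofList [("name", "str")]),
      ("CNAME", PySem.Dict.ofList [("name", "str")]),
      ("PTR", PySem.Dict.ofList [("name", "str")]),
      ("DNAME", PySem.Dict.ofList [("name", "str")]),
      ("A", PySem.Dict.ofList [("address", "str")]),
      ("AAAA", PySem.Dict.ofList [("address", "str")]),
      ("SOA", PySem.Dict.ofList [("mname", "str"), ("rname", "str"), ("serial", "int"),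
        ("refresh", "int"), ("retry", "int"), ("expire", "int"), ("minimum", "int")]),
      ("SRV", PySem.Dict.ofList [("target", "str"), ("port", "int"), ("priority", "int"), ("weight", "int")]),
      ("NAPTR", PySem.Dict.ofList [("order", "int"), ("preference", "int"), ("flags", "str"),
        ("service", "str"), ("regexp", "str"), ("replacement", "str")]),
      ("AFSDB", PySem.Dict.ofList [("hostname", "str"), ("subtype", "int")]),
      ("RP", PySem.Dict.ofList [("mbox", "str"), ("txt", "str")]),
      ("HINFO", PySem.Dict.ofList [("cpu", "str"), ("os", "str")]),
      ("MX", PySem.Dict.ofList [("name2", "str"), ("preference2", "int")]),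
      ("SSHFP", PySem.Dict.ofList [("algorithm", "int"), ("fingerprint_type", "int"), ("fingerprint", "str")]),
      ("TXT", PySem.Dict.ofList [("data", "str")]),
      ("SPF", PySem.Dict.ofList [("data", "str")]),
      ("TSIG", PySem.Dict.ofList [("algorithm2", "str"), ("timesigned", "int"), ("fudge", "int"),
        ("original_id", "int"), ("mac", "str"), ("other_data", "str")]),
      ("CAA", PySem.Dict.ofList [("issue", "str")]) ]

def pvCleanTable : PySem.Dict String (PySem.Dict String String) :=
  PySem.Dict.ofList
    [ ("MX", PySem.Dict.ofList [("name", "str"), ("preference", "int")]),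
      ("TSIG", PySem.Dict.ofList [("timesigned", "int"), ("fudge", "int"), ("original_id", "int"),
        ("mac", "str"), ("other_data", "str"), ("algorithm", "str")]) ]

def get_record_type_properties_alt (record_type : String) (clean : Bool) : List (String × String) :=
  let table :=
    if clean && pvCleanTable.contains record_type then pvCleanTable else pvRawTable
  ((table.get? record_type).getD PySem.Dict.empty).items

-- ===== PRECONDITION & SPEC =====
def Spec_get_record_type_properties (record_type : String) (clean : Bool) (out : List (String × String)) : Prop := out = get_record_type_properties_alt record_type clean
instance (record_type : String) (clean : Bool) (out : List (String × String)) : Decidable (Spec_get_record_type_properties record_type clean out) := by unfold Spec_get_record_type_properties; infer_instance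

-- ===== CLAIM (what is proved, stated in full; the proofs are below) =====
def Claim_equal_get_record_type_properties : Prop := ∀ (record_type : String) (clean : Bool), Dom_get_record_type_properties record_type clean → Spec_get_record_type_properties record_type clean (get_record_type_properties record_type clean)

-- ===== LEMMAS AND PROOFS =====

-- all record types either port reacts to
def pvAllTypes : List String :=
  ["NS", "CNAME", "PTR", "DNAME", "A", "AAAA", "SOA", "SRV", "NAPTR", "AFSDB",
   "RP", "HINFO", "MX", "SSHFP", "TXT", "SPF", "TSIG", "CAA"]

theorem pv_agree_of_mem (record_type : String) (clean : Bool)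
    (h : record_type ∈ pvAllTypes) :
    get_record_type_properties record_type clean = get_record_type_properties_alt record_type clean := by
  simp only [pvAllTypes, List.mem_cons, List.not_mem_nil, or_false] at h
  rcases h with rfl | rfl | rfl | rfl | rfl | rfl | rfl | rfl | rfl | rfl | rfl | rfl | rfl | rfl | rfl | rfl | rfl | rfl <;>
    cases clean <;> decide

theorem pv_agree_of_not_mem (record_type : String) (clean : Bool)
    (h : record_type ∉ pvAllTypes) :
    get_record_type_properties record_type clean = get_record_type_properties_alt record_type clean := by
  have hraw : pvRawTable.get? record_type = none := by
    rw [PySem.Dict.get?_eq_none_iff_not_mem_keys]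
    have hk : pvRawTable.keys = pvAllTypes := by decide
    rw [hk]; exact h
  have hcleanK : pvCleanTable.get? record_type = none := by
    rw [PySem.Dict.get?_eq_none_iff_not_mem_keys]
    have hk : pvCleanTable.keys = ["MX", "TSIG"] := by decide
    rw [hk]
    intro hm
    apply h
    simp only [pvAllTypes, List.mem_cons, List.not_mem_nil, or_false] at *
    tauto
  have hcont : pvCleanTable.contains record_type = false := by
    rw [PySem.Dict.contains_eq_isSome_get?, hcleanK]; rfl
  simp only [pvAllTypes, List.mem_cons, List.not_mem_nil, or_false, not_or] at h
  obtain ⟨h1, h2, h3, h4, h5, h6, h7, h8, h9, h10, h11, h12, h13, h14, h15, h16, h17, h18⟩ := h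
  cases clean <;>
    simp only [get_record_type_properties, get_record_type_properties_alt,
      List.mem_cons, List.not_mem_nil, or_false,
      h1, h2, h3, h4, h5, h6, h7, h8, h9, h10, h11, h12, h13, h14, h15, h16, h17, h18,
      Bool.false_and, Bool.true_and, hcont, reduceIte, Option.getD] <;>
    simp only [show (false = true) = False from by simp, if_false, hraw] <;> decide

-- ===== VERDICT (by name: the statement is the Claim_ definition above) =====
theorem get_record_type_properties_spec : Claim_equal_get_record_type_properties := by
  intro record_type clean _
  unfold Spec_get_record_type_properties
  by_cases h : record_type ∈ pvAllTypes
  · exact pv_agree_of_mem record_type clean h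
  · exact pv_agree_of_not_mem record_type clean h
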